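-- pv_equiv track=rewrite | github.com/iessje/QR-code-detection | QRCodeDetection.py | meanFilter
-- ===== SOURCE A (Python) =====
-- def meanFilter(image_width, image_height, p):
--     window = 5
--     c = int((window-1)/2) #border
--     t = createInitializedGreyscalePixelArray(image_width+c*2, image_height+c*2)
--     for i in range(c,image_height+c):
--         for j in range(c,image_width+c):
--             t[i][j] =  p[i-c][j-c]
--
--     res = []
--     #border ignore
--     for i in range(c,image_height + c):
--         row = []
--         for j in range(c,image_width + c):
--             total = 0
--             for k in range(-c,c+1):
--                 total += sum(t[i+k][j-c:j+c+1])
--             row.append(int(round(total/(window*window))))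
--         res.append(row)
--     return res
--
-- def createInitializedGreyscalePixelArray(image_width, image_height):
--     p = []
--     for i in range(image_height):
--         row =[]
--         for j in range(image_width):
--             row.append(0)
--         p.append(row)
--     return p
-- ===== SOURCE B (Python) =====
-- def meanFilter(image_width, image_height, p):
--     # Integral image (2D prefix sums) over the zero-padded picture:
--     # each 5x5 window sum is four table lookups instead of a 25-element scan.
--     c = 2
--     W = image_width + 2 * c
--     H = image_height + 2 * c
--     # S[a][b] = sum of padded[x][y] for x < a, y < b (padded = p with a zero border of width c)
--     S = [[0] * (W + 1)] if H > 0 else []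
--     for i in range(H):
--         prev = S[i]
--         cur = [0]
--         acc = 0
--         for j in range(W):
--             if c <= i < image_height + c and c <= j < image_width + c:
--                 acc += p[i - c][j - c]
--             cur.append(acc + prev[j + 1])
--         S.append(cur)
--     res = []
--     for i in range(image_height):
--         row = []
--         for j in range(image_width):
--             total = S[i + 5][j + 5] - S[i][j + 5] - S[i + 5][j] + S[i][j]
--             row.append(int(round(total / 25)))
--         res.append(row)
--     return res
-- ===== Notes on version B (the rewrite author's own statement) =====
-- stated objective: faster
-- what changed: Replaces the per-pixel 25-element window scan (triple inner loop with slices over the padded array) by a 2D integral image (prefix-sum table) built once over the same zero-padded picture, so every 5x5 window sum is four table lookups; the identical int(round(total/25)) is applied to the same integer window sum.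
import Mathlib
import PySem

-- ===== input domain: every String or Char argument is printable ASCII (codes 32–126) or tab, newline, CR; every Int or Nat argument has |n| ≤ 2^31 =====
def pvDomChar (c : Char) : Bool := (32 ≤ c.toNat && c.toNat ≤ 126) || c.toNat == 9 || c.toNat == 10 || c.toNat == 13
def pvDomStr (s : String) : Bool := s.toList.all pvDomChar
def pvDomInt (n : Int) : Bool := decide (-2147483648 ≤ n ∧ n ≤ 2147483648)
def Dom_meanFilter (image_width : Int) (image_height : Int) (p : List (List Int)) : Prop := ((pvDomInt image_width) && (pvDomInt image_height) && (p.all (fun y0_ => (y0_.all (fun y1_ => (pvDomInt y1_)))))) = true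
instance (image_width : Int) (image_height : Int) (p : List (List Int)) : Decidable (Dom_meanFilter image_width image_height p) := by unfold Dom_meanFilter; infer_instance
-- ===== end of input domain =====

-- B replaces A's per-pixel 25-element window scans by one 2D integral image (prefix-sum table)
-- over the same zero-padded picture: each 5x5 window sum becomes four table lookups (objective: faster).

-- ===== PORT A =====
-- shared by both ports: exact port of int(round(total/25)) for the window sums arising here
-- (|total| ≤ 25·2^31): total/25 is never a half-integer, and the float quotient's rounding error
-- is far below the distance to the nearest .5 tie, so round = nearest integer = floor((2t+25)/50).
def pyRound25 (total : Int) : Int := PySem.Int.floordiv (2*total + 25) 50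

def meanFilter (image_width : Int) (image_height : Int) (p : List (List Int)) : List (List Int) :=
  let c : Int := 2
  -- t = createInitializedGreyscalePixelArray(image_width+c*2, image_height+c*2)
  let t0 : List (List Int) := (PySem.List.pyRange 0 (image_height + c*2) 1).map
    (fun _ => (PySem.List.pyRange 0 (image_width + c*2) 1).map (fun _ => (0:Int)))
  -- for i …: for j …: t[i][j] = p[i-c][j-c]
  let t := (PySem.List.pyRange c (image_height + c) 1).foldl (fun t i =>
    (PySem.List.pyRange c (image_width + c) 1).foldl (fun t j =>
      PySem.List.pySetD t i (PySem.List.pySetD (PySem.List.pyGetD t i []) j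
        (PySem.List.pyGetD (PySem.List.pyGetD p (i - c) []) (j - c) 0))) t) t0
  -- res rows: total = Σ_k sum(t[i+k][j-c:j+c+1]); append int(round(total/25))
  (PySem.List.pyRange c (image_height + c) 1).map (fun i =>
    (PySem.List.pyRange c (image_width + c) 1).map (fun j =>
      pyRound25 ((PySem.List.pyRange (-c) (c+1) 1).foldl (fun total k =>
        total + (PySem.List.slice (PySem.List.pyGetD t (i + k) []) (some (j - c)) (some (j + c + 1))).sum) 0)))

-- ===== PORT B =====
def meanFilter_alt (image_width : Int) (image_height : Int) (p : List (List Int)) : List (List Int) :=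
  let c : Int := 2
  let W := image_width + 2*c
  let H := image_height + 2*c
  -- S[a][b] = sum of padded[x][y] for x < a, y < b, built row by row with a running acc
  let S : List (List Int) := (PySem.List.pyRange 0 H 1).foldl (fun S i =>
    let prev := PySem.List.pyGetD S i []
    let cur := (PySem.List.pyRange 0 W 1).foldl (fun (st : Int × List Int) j =>
      let acc := if 2 ≤ i ∧ i < image_height + c ∧ 2 ≤ j ∧ j < image_width + c then
          st.1 + PySem.List.pyGetD (PySem.List.pyGetD p (i - c) []) (j - c) 0 else st.1
      (acc, st.2 ++ [acc + PySem.List.pyGetD prev (j + 1) 0])) ((0:Int), ([0] : List Int))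
    S ++ [cur.2]) (if 0 < H then [(PySem.List.pyRange 0 (W + 1) 1).map (fun _ => (0:Int))] else [])
  let g := fun (a b : Int) => PySem.List.pyGetD (PySem.List.pyGetD S a []) b 0
  (PySem.List.pyRange 0 image_height 1).map (fun i =>
    (PySem.List.pyRange 0 image_width 1).map (fun j =>
      pyRound25 (g (i + 5) (j + 5) - g i (j + 5) - g (i + 5) j + g i j)))

-- ===== PRECONDITION & SPEC =====
-- Pre_ excludes exactly the inputs where Python A raises IndexError reading p[i-c][j-c]:
-- with positive width and height, p must have at least image_height rows and each of those
-- rows at least image_width entries.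
def Pre_meanFilter (image_width : Int) (image_height : Int) (p : List (List Int)) : Prop :=
  0 < image_width → 0 < image_height →
    (image_height ≤ (p.length : Int) ∧
      ∀ r ∈ p.take image_height.toNat, image_width ≤ (r.length : Int))
instance (image_width : Int) (image_height : Int) (p : List (List Int)) : Decidable (Pre_meanFilter image_width image_height p) := by unfold Pre_meanFilter; infer_instance

def pvWitness_meanFilter : Int × Int × List (List Int) := (2, 2, [[1, 2], [3, 4]])

def Spec_meanFilter (image_width : Int) (image_height : Int) (p : List (List Int)) (out : List (List Int)) : Prop := out = meanFilter_alt image_width image_height p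
instance (image_width : Int) (image_height : Int) (p : List (List Int)) (out : List (List Int)) : Decidable (Spec_meanFilter image_width image_height p out) := by unfold Spec_meanFilter; infer_instance

-- ===== CLAIM (what is proved, stated in full; the proofs are below) =====
def Claim_equal_meanFilter : Prop := ∀ (image_width : Int) (image_height : Int) (p : List (List Int)), Dom_meanFilter image_width image_height p → Pre_meanFilter image_width image_height p → Spec_meanFilter image_width image_height p (meanFilter image_width image_height p)

-- ===== LEMMAS AND PROOFS =====

def tf (w h : Int) (p : List (List Int)) (a b : Int) : Int :=
  if 2 ≤ a ∧ a < h + 2 ∧ 2 ≤ b ∧ b < w + 2 then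
    PySem.List.pyGetD (PySem.List.pyGetD p (a - 2) []) (b - 2) 0 else 0

def rowP (w h : Int) (p : List (List Int)) (a b : Int) : Int :=
  ((PySem.List.pyRange 0 b 1).map (fun y => tf w h p a y)).sum

def PP (w h : Int) (p : List (List Int)) (a b : Int) : Int :=
  ((PySem.List.pyRange 0 a 1).map (fun x => rowP w h p x b)).sum

def win (w h : Int) (p : List (List Int)) (i j : Int) : Int :=
  ((PySem.List.pyRange i (i+5) 1).map (fun a =>
    ((PySem.List.pyRange j (j+5) 1).map (fun b => tf w h p a b)).sum)).sum

theorem pyRange_map_shift {α : Type} (F : Int → α) (a b c : Int) :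
    (PySem.List.pyRange a b 1).map (fun k => F (c + k)) = (PySem.List.pyRange (a+c) (b+c) 1).map F := by
  rw [PySem.List.pyRange_one a b, PySem.List.pyRange_one (a+c) (b+c)]
  have h : (b + c - (a + c)) = b - a := by ring
  rw [h]
  simp only [List.map_map]
  apply List.map_congr_left
  intro k _
  simp only [Function.comp_apply]
  congr 1
  ring

theorem map_pyRange_shift2 {α : Type} (F : Int → α) (b c : Int) :
    (PySem.List.pyRange c (b+c) 1).map F = (PySem.List.pyRange 0 b 1).map (fun k => F (c+k)) := by
  rw [pyRange_map_shift F 0 b c, show (0:Int)+c = c from by ring]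

theorem set_map_pyRange {α : Type} (n : Int) (f : Int → α) (m : Int) (x : α)
    (h0 : 0 ≤ m) (_hm : m < n) :
    PySem.List.pySetD ((PySem.List.pyRange 0 n 1).map f) m x
      = (PySem.List.pyRange 0 n 1).map (fun b => if b = m then x else f b) := by
  rw [PySem.List.pySetD_of_nonneg _ _ h0]
  apply List.ext_getElem
  · simp
  · intro k hk1 hk2
    have hk : k < n.toNat := by
      simpa [PySem.List.length_pyRange_one] using hk2
    simp only [List.getElem_set, List.getElem_map, PySem.List.getElem_pyRange_one]
    by_cases hkm : k = m.toNat
    · rw [if_pos (by omega), if_pos (by omega)]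
    · rw [if_neg (by omega), if_neg (by omega)]

theorem slice_map_pyRange {α : Type} (n : Int) (f : Int → α) (a b : Int)
    (h0 : 0 ≤ a) (hab : a ≤ b) (hbn : b ≤ n) :
    PySem.List.slice ((PySem.List.pyRange 0 n 1).map f) (some a) (some b)
      = (PySem.List.pyRange a b 1).map f := by
  rw [PySem.List.slice_toNat _ h0 (by omega)]
  apply List.ext_getElem
  · simp [PySem.List.length_pyRange_one]; omega
  · intro k hk1 hk2
    have hlen : k < b.toNat - a.toNat := by
      simp [PySem.List.length_pyRange_one] at hk1; omega
    have hn : a.toNat + k < n.toNat := by omega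
    simp only [List.getElem_take, List.getElem_drop, List.getElem_map,
      PySem.List.getElem_pyRange_one]
    congr 1
    omega

theorem sum_pyRange_split (F : Int → Int) (a b : Int) (h0 : 0 ≤ a) (hab : a ≤ b) :
    ((PySem.List.pyRange 0 b 1).map F).sum
      = ((PySem.List.pyRange 0 a 1).map F).sum + ((PySem.List.pyRange a b 1).map F).sum := by
  rw [PySem.List.pyRange_one_append 0 a b h0 hab, List.map_append, List.sum_append]

theorem sum_map_sub {α : Type} (l : List α) (f g : α → Int) :
    (l.map (fun x => f x - g x)).sum = (l.map f).sum - (l.map g).sum := by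
  induction l with
  | nil => simp
  | cons x t ih => simp [ih]; ring

theorem inner_matrix (i : Int) (v : Int → Int) (m a : Int) (t : List (List Int))
    (h0 : 0 ≤ i) (hi : i < (t.length : Int)) :
    (PySem.List.pyRange a m 1).foldl
        (fun t j => PySem.List.pySetD t i (PySem.List.pySetD (PySem.List.pyGetD t i []) j (v j))) t
      = PySem.List.pySetD t i
          ((PySem.List.pyRange a m 1).foldl (fun r j => PySem.List.pySetD r j (v j))
            (PySem.List.pyGetD t i [])) := by
  by_cases ham : a ≤ m
  · obtain ⟨k, hk⟩ : ∃ k : Nat, m = a + k := ⟨(m - a).toNat, by omega⟩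
    subst hk
    clear ham
    induction k generalizing a t with
    | zero =>
      simp only [Nat.cast_zero, add_zero, PySem.List.pyRange_one_eq_nil (le_refl a), List.foldl_nil]
      rw [PySem.List.pySetD_of_nonneg _ _ h0,
        PySem.List.pyGetD_eq_getElem _ _ h0 hi, List.set_getElem_self]
    | succ k ih =>
      push_cast
      rw [PySem.List.pyRange_one_cons (by omega : a < a + ((k:Int)+1))]
      simp only [List.foldl_cons]
      have hlen : i < ((PySem.List.pySetD t i (PySem.List.pySetD (PySem.List.pyGetD t i []) a (v a))).length : Int) := by
        rw [PySem.List.length_pySetD]; exact hi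
      have harr : (a + ((k:Int)+1)) = (a+1) + (k:Int) := by ring
      rw [harr]
      rw [ih (a+1) _ hlen]
      have hget : PySem.List.pyGetD (PySem.List.pySetD t i (PySem.List.pySetD (PySem.List.pyGetD t i []) a (v a))) i []
          = PySem.List.pySetD (PySem.List.pyGetD t i []) a (v a) := by
        rw [PySem.List.pySetD_of_nonneg _ _ h0,
          PySem.List.pyGetD_eq_getElem _ _ h0 (by simpa using hi),
          List.getElem_set_self (by simp; omega)]
      rw [hget]
      rw [PySem.List.pySetD_of_nonneg _ _ h0, PySem.List.pySetD_of_nonneg _ _ h0,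
        PySem.List.pySetD_of_nonneg _ _ h0, List.set_set]
  · rw [PySem.List.pyRange_one_eq_nil (by omega)]
    simp only [List.foldl_nil]
    rw [PySem.List.pySetD_of_nonneg _ _ h0,
      PySem.List.pyGetD_eq_getElem _ _ h0 hi, List.set_getElem_self]

theorem inner_build (w : Int) (v : Int → Int) (n : Nat) (hn : 2 + (n:Int) ≤ w + 2) :
    (PySem.List.pyRange 2 (2 + (n:Int)) 1).foldl (fun r j => PySem.List.pySetD r j (v j))
        ((PySem.List.pyRange 0 (w+4) 1).map (fun _ => (0:Int)))
      = (PySem.List.pyRange 0 (w+4) 1).map (fun b => if 2 ≤ b ∧ b < 2 + (n:Int) then v b else 0) := by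
  induction n with
  | zero =>
    simp only [Nat.cast_zero, add_zero, PySem.List.pyRange_one_eq_nil (le_refl (2:Int)), List.foldl_nil]
    apply List.map_congr_left
    intro b _
    rw [if_neg (by omega)]
  | succ k ih =>
    push_cast
    rw [show (2:Int) + ((k:Int)+1) = (2 + (k:Int)) + 1 by ring,
      PySem.List.pyRange_one_succ_right (by omega : (2:Int) ≤ 2 + (k:Int)),
      List.foldl_append, List.foldl_cons, List.foldl_nil,
      ih (by push_cast at hn; omega),
      set_map_pyRange (w+4) _ (2+(k:Int)) _ (by omega) (by push_cast at hn; omega)]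
    apply List.map_congr_left
    intro b hb
    by_cases hbk : b = 2 + (k:Int)
    · subst hbk
      rw [if_pos rfl, if_pos (by omega)]
    · rw [if_neg hbk]
      by_cases hc : 2 ≤ b ∧ b < 2 + (k:Int)
      · rw [if_pos hc, if_pos (by omega)]
      · rw [if_neg hc, if_neg (by omega)]

theorem outer_build (w h : Int) (p : List (List Int)) (hw : 0 ≤ w) (n : Nat)
    (hn : 2 + (n:Int) ≤ h + 2) :
    (PySem.List.pyRange 2 (2 + (n:Int)) 1).foldl (fun t i =>
        (PySem.List.pyRange 2 (w + 2) 1).foldl (fun t j =>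
          PySem.List.pySetD t i (PySem.List.pySetD (PySem.List.pyGetD t i []) j
            (PySem.List.pyGetD (PySem.List.pyGetD p (i - 2) []) (j - 2) 0))) t)
        ((PySem.List.pyRange 0 (h + 4) 1).map
          (fun _ => (PySem.List.pyRange 0 (w + 4) 1).map (fun _ => (0:Int))))
      = (PySem.List.pyRange 0 (h + 4) 1).map (fun a =>
          (PySem.List.pyRange 0 (w + 4) 1).map (fun b =>
            if a < 2 + (n:Int) then tf w h p a b else 0)) := by
  induction n with
  | zero =>
    simp only [Nat.cast_zero, add_zero, PySem.List.pyRange_one_eq_nil (le_refl (2:Int)), List.foldl_nil]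
    apply List.map_congr_left
    intro a ha
    rw [PySem.List.mem_pyRange_one] at ha
    apply List.map_congr_left
    intro b _
    by_cases hc : a < 2
    · rw [if_pos hc, tf, if_neg (by omega)]
    · rw [if_neg hc]
  | succ k ih =>
    push_cast
    rw [show (2:Int) + ((k:Int)+1) = (2 + (k:Int)) + 1 by ring,
      PySem.List.pyRange_one_succ_right (by omega : (2:Int) ≤ 2 + (k:Int)),
      List.foldl_append, List.foldl_cons, List.foldl_nil]
    rw [ih (by push_cast at hn; omega)]
    have hn' : 2 + (k:Int) < h + 2 := by push_cast at hn; omega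
    rw [inner_matrix (2+(k:Int)) _ (w+2) 2 _ (by omega)
      (by simp [PySem.List.length_pyRange_one]; omega)]
    rw [PySem.List.pyGetD_map_pyRange_of_nonneg _ (h+4) (2+(k:Int)) [] (by omega) (by omega)]
    -- the row currently at index 2+k is all zeros
    have hrow : ((PySem.List.pyRange 0 (w+4) 1).map (fun b =>
        if 2 + (k:Int) < 2 + (k:Int) then tf w h p (2+(k:Int)) b else 0))
        = (PySem.List.pyRange 0 (w+4) 1).map (fun _ => (0:Int)) := by
      apply List.map_congr_left; intro b _; rw [if_neg (by omega)]
    rw [hrow]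
    rw [show w + 2 = 2 + (w.toNat : Int) by omega]
    rw [inner_build w _ w.toNat (by omega)]
    rw [set_map_pyRange (h+4) _ (2+(k:Int)) _ (by omega) (by omega)]
    apply List.map_congr_left
    intro a ha
    rw [PySem.List.mem_pyRange_one] at ha
    by_cases hak : a = 2 + (k:Int)
    · subst hak
      rw [if_pos rfl]
      apply List.map_congr_left
      intro b hb
      rw [PySem.List.mem_pyRange_one] at hb
      rw [if_pos (show (2:Int)+(k:Int) < 2+(k:Int)+1 by omega), tf]
      split_ifs <;> first | rfl | omega
    · rw [if_neg hak]
      apply List.map_congr_left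
      intro b _
      by_cases hc : a < 2 + (k:Int)
      · rw [if_pos hc, if_pos (by omega)]
      · rw [if_neg hc, if_neg (by omega)]

theorem meanFilter_eq (w h : Int) (p : List (List Int)) (hw : 0 ≤ w) (hh : 0 ≤ h) :
    meanFilter w h p = (PySem.List.pyRange 0 h 1).map (fun i =>
      (PySem.List.pyRange 0 w 1).map (fun j => pyRound25 (win w h p i j))) := by
  simp only [meanFilter]
  rw [show h + 2*2 = h+4 from by ring, show w + 2*2 = w+4 from by ring]
  have e1 : h + 2 = 2 + (h.toNat : Int) := by omega
  have hT : (PySem.List.pyRange 2 (h + 2) 1).foldl (fun t i =>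
        (PySem.List.pyRange 2 (w + 2) 1).foldl (fun t j =>
          PySem.List.pySetD t i (PySem.List.pySetD (PySem.List.pyGetD t i []) j
            (PySem.List.pyGetD (PySem.List.pyGetD p (i - 2) []) (j - 2) 0))) t)
        ((PySem.List.pyRange 0 (h + 4) 1).map
          (fun _ => (PySem.List.pyRange 0 (w + 4) 1).map (fun _ => (0:Int))))
      = (PySem.List.pyRange 0 (h + 4) 1).map (fun a =>
          (PySem.List.pyRange 0 (w + 4) 1).map (fun b => tf w h p a b)) := by
    rw [e1, outer_build w h p hw h.toNat (by omega)]
    apply List.map_congr_left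
    intro a _
    apply List.map_congr_left
    intro b _
    by_cases hc : a < 2 + (h.toNat : Int)
    · rw [if_pos hc]
    · rw [if_neg hc, tf, if_neg (by omega)]
  rw [hT]
  rw [map_pyRange_shift2]
  apply List.map_congr_left
  intro k hk
  rw [PySem.List.mem_pyRange_one] at hk
  rw [map_pyRange_shift2]
  apply List.map_congr_left
  intro l hl
  rw [PySem.List.mem_pyRange_one] at hl
  congr 1
  rw [PySem.List.foldl_add]
  have hmap : (PySem.List.pyRange (-2) (2+1) 1).map (fun kk =>
      (PySem.List.slice (PySem.List.pyGetD ((PySem.List.pyRange 0 (h + 4) 1).map (fun a =>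
          (PySem.List.pyRange 0 (w + 4) 1).map (fun b => tf w h p a b))) (2 + k + kk) [])
        (some (2 + l - 2)) (some (2 + l + 2 + 1))).sum)
      = (PySem.List.pyRange (-2) (2+1) 1).map (fun kk =>
          ((PySem.List.pyRange l (l+5) 1).map (fun b => tf w h p ((2+k) + kk) b)).sum) := by
    apply List.map_congr_left
    intro kk hkk
    rw [PySem.List.mem_pyRange_one] at hkk
    rw [PySem.List.pyGetD_map_pyRange_of_nonneg _ (h+4) (2+k+kk) [] (by omega) (by omega)]
    rw [slice_map_pyRange (w+4) _ (2+l-2) (2+l+2+1) (by omega) (by omega) (by omega)]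
    rw [show 2 + l - 2 = l from by ring, show 2 + l + 2 + 1 = l + 5 from by ring]
  rw [hmap]
  rw [pyRange_map_shift (fun a => ((PySem.List.pyRange l (l+5) 1).map (fun b => tf w h p a b)).sum) (-2) (2+1) (2+k)]
  rw [win, show (-2)+(2+k) = k from by ring, show 2+1+(2+k) = k+5 from by ring]
  exact zero_add _

theorem rowP_succ (w h : Int) (p : List (List Int)) (a b : Int) (hb : 0 ≤ b) :
    rowP w h p a (b + 1) = rowP w h p a b + tf w h p a b := by
  rw [rowP, rowP, PySem.List.pyRange_one_succ_right hb, List.map_append, List.sum_append,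
    List.map_singleton, List.sum_singleton]

theorem PP_succ (w h : Int) (p : List (List Int)) (a b : Int) (ha : 0 ≤ a) :
    PP w h p (a + 1) b = PP w h p a b + rowP w h p a b := by
  rw [PP, PP, PySem.List.pyRange_one_succ_right ha, List.map_append, List.sum_append,
    List.map_singleton, List.sum_singleton]

theorem PP_zero (w h : Int) (p : List (List Int)) (a : Int) : PP w h p a 0 = 0 := by
  rw [PP]
  have : ∀ x ∈ PySem.List.pyRange 0 a 1, rowP w h p x 0 = (fun _ => (0:Int)) x := by
    intro x _
    rw [rowP, PySem.List.pyRange_one_eq_nil (le_refl 0)]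
    rfl
  rw [List.map_congr_left this]
  simp

theorem inner_scan (w h : Int) (p : List (List Int)) (prev : List Int) (i : Int)
    (m : Int) (hm : 0 ≤ m) :
    (PySem.List.pyRange 0 m 1).foldl (fun (st : Int × List Int) j =>
        let acc := if 2 ≤ i ∧ i < h + 2 ∧ 2 ≤ j ∧ j < w + 2 then
            st.1 + PySem.List.pyGetD (PySem.List.pyGetD p (i - 2) []) (j - 2) 0 else st.1
        (acc, st.2 ++ [acc + PySem.List.pyGetD prev (j + 1) 0])) ((0:Int), ([0] : List Int))
      = (rowP w h p i m,
         [0] ++ (PySem.List.pyRange 0 m 1).map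
           (fun j => rowP w h p i (j + 1) + PySem.List.pyGetD prev (j + 1) 0)) := by
  obtain ⟨n, rfl⟩ : ∃ n : Nat, m = (n:Int) := ⟨m.toNat, by omega⟩
  clear hm
  induction n with
  | zero =>
    simp only [Nat.cast_zero, PySem.List.pyRange_one_eq_nil (le_refl (0:Int)),
      List.foldl_nil, List.map_nil, List.append_nil]
    rw [rowP, PySem.List.pyRange_one_eq_nil (le_refl (0:Int))]
    rfl
  | succ n ih =>
    push_cast
    rw [PySem.List.pyRange_one_succ_right (by omega : (0:Int) ≤ (n:Int)),
      List.foldl_append, ih, List.foldl_cons, List.foldl_nil]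
    have hacc : (if 2 ≤ i ∧ i < h + 2 ∧ 2 ≤ (n:Int) ∧ (n:Int) < w + 2 then
        rowP w h p i (n:Int) + PySem.List.pyGetD (PySem.List.pyGetD p (i - 2) []) ((n:Int) - 2) 0
        else rowP w h p i (n:Int)) = rowP w h p i ((n:Int) + 1) := by
      rw [rowP_succ w h p i (n:Int) (by omega), tf]
      by_cases hc : 2 ≤ i ∧ i < h + 2 ∧ 2 ≤ (n:Int) ∧ (n:Int) < w + 2
      · rw [if_pos hc, if_pos hc]
      · rw [if_neg hc, if_neg hc, add_zero]
    simp only []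
    rw [hacc]
    rw [List.map_append, List.map_singleton, ← List.append_assoc]

theorem outer_scan (w h : Int) (p : List (List Int)) (hw : 0 ≤ w) (m : Int) (hm : 0 ≤ m) :
    (PySem.List.pyRange 0 m 1).foldl (fun S i =>
        let prev := PySem.List.pyGetD S i []
        let cur := (PySem.List.pyRange 0 (w + 4) 1).foldl (fun (st : Int × List Int) j =>
          let acc := if 2 ≤ i ∧ i < h + 2 ∧ 2 ≤ j ∧ j < w + 2 then
              st.1 + PySem.List.pyGetD (PySem.List.pyGetD p (i - 2) []) (j - 2) 0 else st.1
          (acc, st.2 ++ [acc + PySem.List.pyGetD prev (j + 1) 0])) ((0:Int), ([0] : List Int))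
        S ++ [cur.2]) [(PySem.List.pyRange 0 (w + 5) 1).map (fun _ => (0:Int))]
      = (PySem.List.pyRange 0 (m + 1) 1).map (fun a =>
          (PySem.List.pyRange 0 (w + 5) 1).map (fun b => PP w h p a b)) := by
  obtain ⟨n, rfl⟩ : ∃ n : Nat, m = (n:Int) := ⟨m.toNat, by omega⟩
  clear hm
  induction n with
  | zero =>
    simp only [Nat.cast_zero, PySem.List.pyRange_one_eq_nil (le_refl (0:Int)), List.foldl_nil,
      PySem.List.pyRange_one_singleton, List.map_singleton]
    have hz : ∀ b ∈ PySem.List.pyRange 0 (w+5) 1, (fun _ => (0:Int)) b = PP w h p 0 b := by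
      intro b _
      rw [PP, PySem.List.pyRange_one_eq_nil (le_refl (0:Int))]
      rfl
    rw [List.map_congr_left hz]
  | succ n ih =>
    push_cast
    rw [PySem.List.pyRange_one_succ_right (by omega : (0:Int) ≤ (n:Int)),
      List.foldl_append, ih, List.foldl_cons, List.foldl_nil]
    rw [PySem.List.pyGetD_map_pyRange_of_nonneg _ ((n:Int)+1) (n:Int) [] (by omega) (by omega)]
    rw [inner_scan w h p _ (n:Int) (w+4) (by omega)]
    have hcur : ([(0:Int)] ++ (PySem.List.pyRange 0 (w+4) 1).map (fun j =>
        rowP w h p (n:Int) (j + 1) +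
          PySem.List.pyGetD ((PySem.List.pyRange 0 (w + 5) 1).map (fun b => PP w h p (n:Int) b)) (j + 1) 0))
        = (PySem.List.pyRange 0 (w + 5) 1).map (fun b => PP w h p ((n:Int)+1) b) := by
      have hptw : ∀ j ∈ PySem.List.pyRange 0 (w+4) 1,
          rowP w h p (n:Int) (j + 1) +
            PySem.List.pyGetD ((PySem.List.pyRange 0 (w + 5) 1).map (fun b => PP w h p (n:Int) b)) (j + 1) 0
          = PP w h p ((n:Int)+1) (j+1) := by
        intro j hj
        rw [PySem.List.mem_pyRange_one] at hj
        rw [PySem.List.pyGetD_map_pyRange_of_nonneg _ (w+5) (j+1) 0 (by omega) (by omega)]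
        rw [PP_succ w h p (n:Int) (j+1) (by omega), add_comm]
      rw [List.map_congr_left hptw]
      rw [show (fun j => PP w h p ((n:Int)+1) (j+1)) = (fun j => PP w h p ((n:Int)+1) (1+j))
        from funext (fun j => by rw [add_comm j 1])]
      rw [pyRange_map_shift (fun b => PP w h p ((n:Int)+1) b) 0 (w+4) 1]
      rw [show w + 5 = w+4+1 from by ring]
      rw [PySem.List.pyRange_one_cons (by omega : (0:Int) < w+4+1), List.map_cons, PP_zero]
      rfl
    rw [hcur]
    rw [show (n:Int) + 1 + 1 = ((n:Int)+1) + 1 from rfl,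
      PySem.List.pyRange_one_succ_right (by omega : (0:Int) ≤ (n:Int)+1), List.map_append,
      List.map_singleton]

theorem PP_diff (w h : Int) (p : List (List Int)) (i j : Int) (hi : 0 ≤ i) (hj : 0 ≤ j) :
    PP w h p (i+5) (j+5) - PP w h p i (j+5) - PP w h p (i+5) j + PP w h p i j
      = win w h p i j := by
  have h1 : PP w h p (i+5) (j+5) - PP w h p i (j+5)
      = ((PySem.List.pyRange i (i+5) 1).map (fun x => rowP w h p x (j+5))).sum := by
    rw [PP, PP, sum_pyRange_split (fun x => rowP w h p x (j+5)) i (i+5) hi (by omega)]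
    ring
  have h2 : PP w h p (i+5) j - PP w h p i j
      = ((PySem.List.pyRange i (i+5) 1).map (fun x => rowP w h p x j)).sum := by
    rw [PP, PP, sum_pyRange_split (fun x => rowP w h p x j) i (i+5) hi (by omega)]
    ring
  have e : PP w h p (i+5) (j+5) - PP w h p i (j+5) - PP w h p (i+5) j + PP w h p i j
      = (PP w h p (i+5) (j+5) - PP w h p i (j+5)) - (PP w h p (i+5) j - PP w h p i j) := by ring
  rw [e, h1, h2, ← sum_map_sub]
  rw [win]
  apply congrArg
  apply List.map_congr_left
  intro x _
  rw [rowP, rowP, sum_pyRange_split (fun y => tf w h p x y) j (j+5) hj (by omega)]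
  ring

theorem meanFilter_alt_eq (w h : Int) (p : List (List Int)) (hw : 0 ≤ w) (hh : 0 ≤ h) :
    meanFilter_alt w h p = (PySem.List.pyRange 0 h 1).map (fun i =>
      (PySem.List.pyRange 0 w 1).map (fun j => pyRound25 (win w h p i j))) := by
  simp only [meanFilter_alt]
  rw [show w + 2*2 = w+4 from by ring, show h + 2*2 = h+4 from by ring,
    show w+4+1 = w+5 from by ring, if_pos (show (0:Int) < h+4 from by omega)]
  rw [outer_scan w h p hw (h+4) (by omega)]
  apply List.map_congr_left
  intro i hi
  rw [PySem.List.mem_pyRange_one] at hi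
  apply List.map_congr_left
  intro j hj
  rw [PySem.List.mem_pyRange_one] at hj
  rw [PySem.List.pyGetD_map_pyRange_of_nonneg _ (h+4+1) (i+5) [] (by omega) (by omega),
    PySem.List.pyGetD_map_pyRange_of_nonneg _ (h+4+1) i [] (by omega) (by omega),
    PySem.List.pyGetD_map_pyRange_of_nonneg _ (w+5) (j+5) 0 (by omega) (by omega),
    PySem.List.pyGetD_map_pyRange_of_nonneg _ (w+5) (j+5) 0 (by omega) (by omega),
    PySem.List.pyGetD_map_pyRange_of_nonneg _ (w+5) j 0 (by omega) (by omega),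
    PySem.List.pyGetD_map_pyRange_of_nonneg _ (w+5) j 0 (by omega) (by omega)]
  rw [PP_diff w h p i j (by omega) (by omega)]

-- degenerate shapes --------------------------------------------------------
theorem meanFilter_neg_h (w h : Int) (p : List (List Int)) (hh : h < 0) :
    meanFilter w h p = [] ∧ meanFilter_alt w h p = [] := by
  constructor
  · simp only [meanFilter]
    rw [PySem.List.pyRange_one_eq_nil (show h + 2 ≤ 2 from by omega)]
    simp
  · simp only [meanFilter_alt]
    rw [PySem.List.pyRange_one_eq_nil (show h ≤ 0 from by omega)]
    simp

theorem meanFilter_neg_w (w h : Int) (p : List (List Int)) (hw : w < 0) (_hh : 0 ≤ h) :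
    meanFilter w h p = List.replicate h.toNat ([] : List Int) ∧
      meanFilter_alt w h p = List.replicate h.toNat ([] : List Int) := by
  constructor
  · simp only [meanFilter]
    rw [PySem.List.pyRange_one_eq_nil (show w + 2 ≤ 2 from by omega)]
    simp only [List.map_nil, List.map_const', PySem.List.length_pyRange_one]
    rw [show h + 2 - 2 = h from by ring]
  · simp only [meanFilter_alt]
    rw [PySem.List.pyRange_one_eq_nil (show w ≤ 0 from by omega)]
    simp only [List.map_nil, List.map_const', PySem.List.length_pyRange_one]
    rw [show h - 0 = h from by ring]

-- ===== VERDICT (by name: the statement is the Claim_ definition above) =====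
theorem meanFilter_spec : Claim_equal_meanFilter := by
  intro w h p _ _
  unfold Spec_meanFilter
  rcases lt_or_ge h 0 with hh | hh
  · rw [(meanFilter_neg_h w h p hh).1, (meanFilter_neg_h w h p hh).2]
  · rcases lt_or_ge w 0 with hw | hw
    · rw [(meanFilter_neg_w w h p hw hh).1, (meanFilter_neg_w w h p hw hh).2]
    · rw [meanFilter_eq w h p hw hh, meanFilter_alt_eq w h p hw hh]
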